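-- pv_equiv track=rewrite | github.com/lkayarana/beta_predictor | scripts/03_label_candidates.py | clean_sequence_and_labels
-- ===== SOURCE A (Python) =====
-- AA20 = set("ACDEFGHIKLMNPQRSTVWY")
--
-- def clean_sequence_and_labels(sequence, labels, residue_numbers):
--     new_seq = []
--     new_labels = []
--     new_resnums = []
--
--     for aa, lab, rn in zip(sequence, labels, residue_numbers):
--         if aa in AA20 and lab in {"B", "N"}:
--             new_seq.append(aa)
--             new_labels.append(lab)
--             new_resnums.append(rn)
--
--     return "".join(new_seq), new_labels, new_resnums
-- ===== SOURCE B (Python) =====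
-- AA20 = set("ACDEFGHIKLMNPQRSTVWY")
--
-- def clean_sequence_and_labels(sequence, labels, residue_numbers):
--     n = min(len(sequence), len(labels), len(residue_numbers))
--     idx = [i for i in range(n)
--            if sequence[i] in AA20 and labels[i] in {"B", "N"}]
--     return ("".join(sequence[i] for i in idx),
--             [labels[i] for i in idx],
--             [residue_numbers[i] for i in idx])
-- ===== Notes on version B (the rewrite author's own statement) =====
-- stated objective: alternative
-- what changed: B never zips the three inputs: it computes the list of surviving positions once by indexed tests over range(min lengths), then materialises each of the three outputs by a separate indexed gather over that index list, instead of A's single zipped loop threading three parallel accumulators.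
import Mathlib
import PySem

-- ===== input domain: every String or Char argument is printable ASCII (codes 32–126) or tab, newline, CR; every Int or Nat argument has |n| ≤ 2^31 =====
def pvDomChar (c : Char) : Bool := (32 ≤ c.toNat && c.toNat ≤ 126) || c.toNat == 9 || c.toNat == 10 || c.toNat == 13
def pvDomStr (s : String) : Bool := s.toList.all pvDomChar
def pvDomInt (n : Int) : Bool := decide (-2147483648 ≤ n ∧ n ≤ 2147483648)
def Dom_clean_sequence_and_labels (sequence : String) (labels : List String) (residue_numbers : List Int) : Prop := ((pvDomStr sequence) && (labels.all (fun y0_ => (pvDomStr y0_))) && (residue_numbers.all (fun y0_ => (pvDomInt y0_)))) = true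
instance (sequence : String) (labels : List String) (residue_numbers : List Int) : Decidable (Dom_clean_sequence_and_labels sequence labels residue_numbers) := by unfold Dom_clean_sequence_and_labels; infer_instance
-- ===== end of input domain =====

-- B computes the list of surviving positions once, then gathers each output by indexed lookups, instead of A's zipped loop with three accumulators; same cost, alternative structure.

-- AA20 = set("ACDEFGHIKLMNPQRSTVWY")  (module constant shared by both versions)
def AA20 : PySem.Set Char := PySem.Set.ofList "ACDEFGHIKLMNPQRSTVWY".toList

-- ===== PORT A =====
-- the for-loop over zip(sequence, labels, residue_numbers) with three append-accumulators
def clean_sequence_and_labels (sequence : String) (labels : List String) (residue_numbers : List Int) : String × List String × List Int :=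
  let zipped := (sequence.toList.zip labels).zip residue_numbers
  let st := zipped.foldl
    (fun (acc : List Char × List String × List Int) x =>
      let aa := x.1.1; let lab := x.1.2; let rn := x.2
      if AA20.contains aa && ["B", "N"].contains lab then
        (acc.1 ++ [aa], acc.2.1 ++ [lab], acc.2.2 ++ [rn])
      else acc)
    ([], [], [])
  (String.ofList st.1, st.2.1, st.2.2)

-- ===== PORT B =====
-- kept index list over range(min of the three lengths), then three indexed gathers
-- (indices in idx are always in range, so getD's defaults are never used)
def clean_sequence_and_labels_alt (sequence : String) (labels : List String) (residue_numbers : List Int) : String × List String × List Int :=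
  let s := sequence.toList
  let n := min (min s.length labels.length) residue_numbers.length
  let idx := (List.range n).filter
    (fun i => AA20.contains (s.getD i ' ') && ["B", "N"].contains (labels.getD i ""))
  (String.ofList (idx.map (fun i => s.getD i ' ')),
   idx.map (fun i => labels.getD i ""),
   idx.map (fun i => residue_numbers.getD i 0))

-- ===== PRECONDITION & SPEC =====
def Spec_clean_sequence_and_labels (sequence : String) (labels : List String) (residue_numbers : List Int) (out : String × List String × List Int) : Prop := out = clean_sequence_and_labels_alt sequence labels residue_numbers
instance (sequence : String) (labels : List String) (residue_numbers : List Int) (out : String × List String × List Int) : Decidable (Spec_clean_sequence_and_labels sequence labels residue_numbers out) := by unfold Spec_clean_sequence_and_labels; infer_instance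

-- ===== CLAIM (what is proved, stated in full; the proofs are below) =====
def Claim_equal_clean_sequence_and_labels : Prop := ∀ (sequence : String) (labels : List String) (residue_numbers : List Int), Dom_clean_sequence_and_labels sequence labels residue_numbers → Spec_clean_sequence_and_labels sequence labels residue_numbers (clean_sequence_and_labels sequence labels residue_numbers)

-- ===== LEMMAS AND PROOFS =====

-- A's loop computes the three projections of the filtered zipped list
theorem foldA_eq_filter (p : (Char × String) × Int → Bool) :
    ∀ (l : List ((Char × String) × Int)) (cs : List Char) (ls : List String) (rs : List Int),
    l.foldl
      (fun (acc : List Char × List String × List Int) x =>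
        if p x then (acc.1 ++ [x.1.1], acc.2.1 ++ [x.1.2], acc.2.2 ++ [x.2]) else acc)
      (cs, ls, rs)
    = (cs ++ (l.filter p).map (fun x => x.1.1),
       ls ++ (l.filter p).map (fun x => x.1.2),
       rs ++ (l.filter p).map (fun x => x.2)) := by
  intro l
  induction l with
  | nil => intro cs ls rs; simp
  | cons h t ih =>
    intro cs ls rs
    by_cases hp : p h = true <;> simp [List.foldl, hp, ih]

-- the zipped triple list is the gather of the three lists over range(min of lengths)
theorem zip3_eq_range_map :
    ∀ (s : List Char) (ls : List String) (rs : List Int),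
    (s.zip ls).zip rs
      = (List.range (min (min s.length ls.length) rs.length)).map
          (fun i => ((s.getD i ' ', ls.getD i ""), rs.getD i 0)) := by
  intro s
  induction s with
  | nil => intro ls rs; simp
  | cons a s ih =>
    intro ls rs
    cases ls with
    | nil => simp
    | cons b ls =>
      cases rs with
      | nil => simp
      | cons c rs =>
        have hmin : min (min (a :: s).length (b :: ls).length) (c :: rs).length
            = (min (min s.length ls.length) rs.length) + 1 := by
          simp [List.length_cons, Nat.succ_min_succ]
        rw [hmin, List.range_succ_eq_map]
        simp [ih, List.map_map, Function.comp]

-- ===== VERDICT (by name: the statement is the Claim_ definition above) =====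
theorem clean_sequence_and_labels_spec : Claim_equal_clean_sequence_and_labels := by
  intro sequence labels residue_numbers _
  unfold Spec_clean_sequence_and_labels clean_sequence_and_labels clean_sequence_and_labels_alt
  simp only []
  rw [foldA_eq_filter, zip3_eq_range_map]
  simp [List.filter_map, List.map_map, Function.comp_def]
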